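-- pv_equiv track=rewrite | github.com/OlegGlo/2XC3 | code.py | are_valid_groups
-- ===== SOURCE A (Python) =====
-- def are_valid_groups(groups, studentNum):
--
--     length = len(studentNum)
--     count = 0
--     countID = 0
--
--     for group in groups:
--         count = 0
--         countID = 0
--         for students in studentNum:
--             if (group.count(students) == 0):
--                 break
--             if (group.count(students) >= 1):
--                 count += group.count(students)
--                 countID += 1
--
--         if (count >= length) and (countID == length):
--             return True
--
--     return False
-- ===== SOURCE B (Python) =====
-- def are_valid_groups(groups, studentNum):
--     # Transposed loops: keep a narrowing list of candidate groups and
--     # filter it by one student at a time, short-circuiting when empty.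
--     candidates = groups
--     for s in studentNum:
--         candidates = [g for g in candidates if s in g]
--         if not candidates:
--             return False
--     return len(candidates) > 0
-- ===== Notes on version B (the rewrite author's own statement) =====
-- stated objective: alternative
-- what changed: Transposes the loops: instead of scanning each group with a per-student count/countID accumulator and early break, B maintains a narrowing candidate-group list filtered by one student at a time, returning False as soon as it empties.
import Mathlib
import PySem

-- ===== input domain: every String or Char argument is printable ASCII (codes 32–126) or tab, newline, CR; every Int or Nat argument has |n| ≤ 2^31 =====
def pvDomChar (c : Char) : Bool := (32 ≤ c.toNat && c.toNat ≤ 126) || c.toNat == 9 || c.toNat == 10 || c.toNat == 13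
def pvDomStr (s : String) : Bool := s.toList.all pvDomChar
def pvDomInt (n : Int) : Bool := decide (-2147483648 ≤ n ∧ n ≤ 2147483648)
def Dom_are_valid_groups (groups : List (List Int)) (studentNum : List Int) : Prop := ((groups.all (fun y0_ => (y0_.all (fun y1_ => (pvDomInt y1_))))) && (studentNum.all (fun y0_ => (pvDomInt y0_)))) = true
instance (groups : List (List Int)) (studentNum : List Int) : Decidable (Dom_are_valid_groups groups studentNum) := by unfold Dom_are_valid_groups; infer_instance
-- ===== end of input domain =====

-- ===== PORT A =====
-- inner 'for students in studentNum' loop of A, carrying (count, countID); break => return state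
def avgInner (group : List Int) : List Int → Int → Int → Int × Int
  | [], count, countID => (count, countID)
  | s :: rest, count, countID =>
    if (PySem.List.count group s : Int) = 0 then (count, countID)
    else if (1 : Int) ≤ (PySem.List.count group s : Int) then
      avgInner group rest (count + (PySem.List.count group s : Int)) (countID + 1)
    else avgInner group rest count countID

-- outer 'for group in groups' loop of A with its early 'return True'
def avgOuter (studentNum : List Int) (length : Int) : List (List Int) → Bool
  | [] => false
  | g :: gs =>
    let r := avgInner g studentNum 0 0
    if length ≤ r.1 ∧ r.2 = length then true else avgOuter studentNum length gs

def are_valid_groups (groups : List (List Int)) (studentNum : List Int) : Bool :=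
  avgOuter studentNum (studentNum.length : Int) groups

-- ===== PORT B =====
-- B's loop: narrow the candidate-group list by one student at a time, short-circuit on empty
def avgAltLoop : List (List Int) → List Int → Bool
  | cands, [] => decide (0 < cands.length)
  | cands, s :: rest =>
    let c := cands.filter (fun g => g.contains s)
    if c.isEmpty then false else avgAltLoop c rest

def are_valid_groups_alt (groups : List (List Int)) (studentNum : List Int) : Bool :=
  avgAltLoop groups studentNum

-- ===== PRECONDITION & SPEC =====
def Spec_are_valid_groups (groups : List (List Int)) (studentNum : List Int) (out : Bool) : Prop := out = are_valid_groups_alt groups studentNum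
instance (groups : List (List Int)) (studentNum : List Int) (out : Bool) : Decidable (Spec_are_valid_groups groups studentNum out) := by unfold Spec_are_valid_groups; infer_instance

-- ===== CLAIM (what is proved, stated in full; the proofs are below) =====
def Claim_equal_are_valid_groups : Prop := ∀ (groups : List (List Int)) (studentNum : List Int), Dom_are_valid_groups groups studentNum → Spec_are_valid_groups groups studentNum (are_valid_groups groups studentNum)

-- ===== LEMMAS AND PROOFS =====

theorem avgInner_of_all (g : List Int) (sn : List Int) (h : ∀ s ∈ sn, g.contains s) :
    ∀ (c i : Int), (avgInner g sn c i).2 = i + sn.length ∧ c + sn.length ≤ (avgInner g sn c i).1 := by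
  induction sn with
  | nil => intro c i; simp [avgInner]
  | cons s rest ih =>
    intro c i
    have hs : s ∈ g := by
      have := h s (by simp)
      simpa using this
    have hcnt : 1 ≤ (PySem.List.count g s : Int) := by
      have : 0 < List.count s g := List.count_pos_iff.mpr hs
      rw [PySem.List.count_eq]; omega
    have ih' := ih (fun x hx => h x (by simp [hx])) (c + (PySem.List.count g s : Int)) (i + 1)
    simp only [avgInner]
    rw [if_neg (by omega), if_pos hcnt]
    refine ⟨?_, ?_⟩
    · rw [ih'.1, List.length_cons]; push_cast; ring
    · have h2 := ih'.2
      rw [List.length_cons]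
      push_cast at h2 ⊢
      omega

theorem avgInner_snd_lt (g : List Int) (sn : List Int) (h : ¬ ∀ s ∈ sn, g.contains s) :
    ∀ (c i : Int), (avgInner g sn c i).2 < i + sn.length := by
  induction sn with
  | nil => exact absurd (by simp) h
  | cons s rest ih =>
    intro c i
    by_cases hs : s ∈ g
    · have hcnt : 1 ≤ (PySem.List.count g s : Int) := by
        have : 0 < List.count s g := List.count_pos_iff.mpr hs
        rw [PySem.List.count_eq]; omega
      have hrest : ¬ ∀ x ∈ rest, g.contains x := fun hall => h (by
        intro x hx
        rcases List.mem_cons.mp hx with rfl | hx'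
        · simpa using hs
        · exact hall x hx')
      have h2 := ih hrest (c + (PySem.List.count g s : Int)) (i + 1)
      simp only [avgInner]
      rw [if_neg (by omega), if_pos hcnt, List.length_cons]
      push_cast at h2 ⊢
      omega
    · have hcnt : (PySem.List.count g s : Int) = 0 := by
        have : List.count s g = 0 := List.count_eq_zero.mpr hs
        rw [PySem.List.count_eq, this]; rfl
      simp only [avgInner]
      rw [if_pos hcnt, List.length_cons]
      push_cast
      omega

theorem avgOuter_eq_any (sn : List Int) (gs : List (List Int)) :
    avgOuter sn (sn.length : Int) gs = gs.any (fun g => sn.all (fun s => g.contains s)) := by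
  induction gs with
  | nil => simp [avgOuter]
  | cons g rest ih =>
    simp only [avgOuter, List.any_cons]
    by_cases hall : ∀ s ∈ sn, g.contains s
    · have h := avgInner_of_all g sn hall 0 0
      rw [if_pos (by constructor <;> omega)]
      have hb : sn.all (fun s => g.contains s) = true := by simpa [List.all_eq_true] using hall
      rw [hb, Bool.true_or]
    · have h := avgInner_snd_lt g sn hall 0 0
      rw [if_neg (by intro hc; omega)]
      have hb : sn.all (fun s => g.contains s) = false := by
        simpa [List.all_eq_true] using hall
      rw [hb, Bool.false_or, ih]

theorem avgAltLoop_eq_any (sn : List Int) :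
    ∀ (cands : List (List Int)),
      avgAltLoop cands sn = cands.any (fun g => sn.all (fun s => g.contains s)) := by
  induction sn with
  | nil =>
    intro cands; cases cands <;> simp [avgAltLoop]
  | cons s rest ih =>
    intro cands
    simp only [avgAltLoop]
    by_cases hemp : (cands.filter (fun g => g.contains s)).isEmpty
    · rw [if_pos hemp]
      have hnil : cands.filter (fun g => g.contains s) = [] := List.isEmpty_iff.mp hemp
      have hfalse : cands.any (fun g => (s :: rest).all (fun x => g.contains x)) = false := by
        rw [List.any_eq_false]
        intro g hg
        have hns := List.filter_eq_nil_iff.mp hnil g hg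
        intro hall
        rw [List.all_cons, Bool.and_eq_true] at hall
        exact hns hall.1
      exact hfalse.symm
    · rw [if_neg hemp, ih, List.any_filter]
      simp [List.all_cons]

-- ===== VERDICT (by name: the statement is the Claim_ definition above) =====
theorem are_valid_groups_spec : Claim_equal_are_valid_groups := by
  intro groups studentNum _
  unfold Spec_are_valid_groups are_valid_groups are_valid_groups_alt
  rw [avgOuter_eq_any, avgAltLoop_eq_any]
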